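-- pv_equiv track=rewrite | github.com/algorithmica-repository/SCIS-TOP20ADV-PYTHON | greedy thinking - II/min coin change.py | minCoins12
-- ===== SOURCE A (Python) =====
-- def minCoins12(n, b, s):
--     ncoins = 0
--     denom = pow(b, n-1)
--     while(s > 0):
--         if(denom <= s):
--             ncoins += (s//denom)
--             s = s % denom
--         denom //= b
--     return ncoins
-- ===== SOURCE B (Python) =====
-- def minCoins12(n, b, s):
--     if s <= 0:
--         return 0
--     top = pow(b, n - 1)
--     high = s // top
--     rem = s % top
--     total = 0
--     while rem > 0:
--         total += rem % b
--         rem //= b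
--     return high + total
-- ===== Notes on version B (the rewrite author's own statement) =====
-- stated objective: faster
-- what changed: Instead of scanning all n denominations high-to-low with a shrinking denom, B takes the top-coin count with one divmod by b^(n-1) and then sums the base-b digits of the remainder bottom-up with a modulo loop, so the loop runs O(log_b s) times instead of n times.
-- outside the precondition, e.g. on minCoins12(0, 2, 5): A returns 10.0, B returns 10.0; on minCoins12(3, -2, 10): A returns 1, B returns 2
import Mathlib
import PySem

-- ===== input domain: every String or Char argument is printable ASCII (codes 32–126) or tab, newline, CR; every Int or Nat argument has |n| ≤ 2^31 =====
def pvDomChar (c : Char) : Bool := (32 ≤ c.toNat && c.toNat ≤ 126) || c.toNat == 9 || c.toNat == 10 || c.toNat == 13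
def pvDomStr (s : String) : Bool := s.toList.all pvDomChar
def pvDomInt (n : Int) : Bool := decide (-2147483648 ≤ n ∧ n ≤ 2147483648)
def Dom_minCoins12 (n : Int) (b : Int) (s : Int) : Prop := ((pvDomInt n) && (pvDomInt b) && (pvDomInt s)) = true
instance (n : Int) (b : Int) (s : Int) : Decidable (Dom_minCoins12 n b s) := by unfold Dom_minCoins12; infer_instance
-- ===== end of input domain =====

-- B replaces A's high-to-low scan over all n denominations by one divmod at the top
-- denomination plus a low-to-high base-b digit sum of the remainder (a timing run
-- measures this; return-value equivalence on Pre_ is what is proved below).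

-- ===== PORT A =====
-- the while-loop of A; the fuel argument is only a totality guard: on Pre_ the loop
-- finishes within n iterations, and minCoins12 passes fuel n.toNat+1
def minCoins12Loop : Nat → Int → Int → Int → Int → Int
  | 0, _, _, _, ncoins => ncoins
  | fuel+1, b, denom, s, ncoins =>
    if 0 < s then
      if denom ≤ s then
        minCoins12Loop fuel b (PySem.Int.floordiv denom b) (PySem.Int.mod s denom)
          (ncoins + PySem.Int.floordiv s denom)
      else
        minCoins12Loop fuel b (PySem.Int.floordiv denom b) s ncoins
    else ncoins

-- pow(b, n-1): on Pre_ either n ≥ 1 (so the exponent is n-1 ≥ 0) or s ≤ 0 (denom unused)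
def minCoins12 (n : Int) (b : Int) (s : Int) : Int :=
  minCoins12Loop (n.toNat + 1) b (b ^ (n - 1).toNat) s 0

-- ===== PORT B =====
-- B's digit loop `while rem > 0: total += rem % b; rem //= b`; fuel is a totality
-- guard only (rem < b^(n-1) on entry, so n.toNat+1 iterations always suffice on Pre_)
def altDigitLoop : Nat → Int → Int → Int → Int
  | 0, _, _, total => total
  | fuel+1, b, rem, total =>
    if 0 < rem then
      altDigitLoop fuel b (PySem.Int.floordiv rem b) (total + PySem.Int.mod rem b)
    else total

def minCoins12_alt (n : Int) (b : Int) (s : Int) : Int :=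
  if s ≤ 0 then 0
  else
    let top := b ^ (n - 1).toNat
    PySem.Int.floordiv s top + altDigitLoop (n.toNat + 1) b (PySem.Int.mod s top) 0

-- ===== PRECONDITION & SPEC =====
-- Pre_ excludes: n ≤ 0 with s > 0 (pow(b, n-1) is a float, A returns a float or raises
-- ZeroDivisionError for b = 0), b = 0 with s > 0 (denom //= b raises ZeroDivisionError),
-- and b < 0 with s > 0 (A's value comes from an alternating-sign denom scan that
-- terminates only accidentally and is meaningless as a coin count).  For s ≤ 0 the loop
-- never runs and A returns 0 except when pow itself raises (b = 0 with n ≤ 0).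
def Pre_minCoins12 (n : Int) (b : Int) (s : Int) : Prop :=
  (s ≤ 0 ∧ (b ≠ 0 ∨ 1 ≤ n)) ∨ (1 ≤ s ∧ 1 ≤ n ∧ 1 ≤ b)
instance (n : Int) (b : Int) (s : Int) : Decidable (Pre_minCoins12 n b s) := by
  unfold Pre_minCoins12; infer_instance

def pvWitness_minCoins12 : Int × Int × Int := (3, 2, 11)

def Spec_minCoins12 (n : Int) (b : Int) (s : Int) (out : Int) : Prop := out = minCoins12_alt n b s
instance (n : Int) (b : Int) (s : Int) (out : Int) : Decidable (Spec_minCoins12 n b s out) := by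
  unfold Spec_minCoins12; infer_instance

-- ===== CLAIM (what is proved, stated in full; the proofs are below) =====
def Claim_equal_minCoins12 : Prop := ∀ (n : Int) (b : Int) (s : Int), Dom_minCoins12 n b s → Pre_minCoins12 n b s → Spec_minCoins12 n b s (minCoins12 n b s)

-- ===== LEMMAS AND PROOFS =====

-- sum of the base-b digits of r (0 for r ≤ 0 or b < 2); proof-side reference function
def dsum (b r : Int) : Int :=
  if h : 0 < r ∧ 2 ≤ b then
    PySem.Int.mod r b + dsum b (PySem.Int.floordiv r b)
  else 0
termination_by r.toNat
decreasing_by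
  rw [PySem.Int.floordiv_eq_ediv_of_pos (by omega)]
  have h1 : r / b < r := by
    rw [Int.ediv_lt_iff_lt_mul (by omega : (0:Int) < b)]; nlinarith
  have h2 : 0 ≤ r / b := Int.ediv_nonneg (by omega) (by omega)
  omega

theorem dsum_nonpos (b r : Int) (h : r ≤ 0) : dsum b r = 0 := by
  rw [dsum]; simp [show ¬(0 < r ∧ 2 ≤ b) by omega]

theorem dsum_pos (b r : Int) (hr : 0 < r) (hb : 2 ≤ b) :
    dsum b r = r % b + dsum b (r / b) := by
  rw [dsum]
  simp [show (0 < r ∧ 2 ≤ b) by omega,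
    PySem.Int.floordiv_eq_ediv_of_pos (show (0:Int) < b by omega),
    PySem.Int.mod_eq_emod_of_pos (show (0:Int) < b by omega)]

-- splitting off the top base-b digit block: for 0 ≤ r < b^(k+1),
-- dsum b r = r / b^k + dsum b (r % b^k)
theorem dsum_split (b : Int) (hb : 2 ≤ b) :
    ∀ (k : Nat) (r : Int), 0 ≤ r → r < b ^ (k + 1) →
      dsum b r = r / b ^ k + dsum b (r % b ^ k) := by
  intro k
  induction k with
  | zero =>
    intro r h0 h1
    simp only [pow_zero, pow_one] at *
    rcases eq_or_lt_of_le h0 with h | h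
    · simp [← h, dsum_nonpos]
    · have h1' : r < b := by simpa using h1
      rw [dsum_pos b r h hb, Int.ediv_eq_zero_of_lt h0 h1', Int.emod_eq_of_lt h0 h1']
      simp [Int.ediv_one, Int.emod_one, dsum_nonpos b 0 le_rfl]
  | succ k ih =>
    intro r h0 h1
    rcases eq_or_lt_of_le h0 with h | h
    · simp [← h, dsum_nonpos]
    have hbpos : (0:Int) < b := by omega
    have hbk : (0:Int) < b ^ k := pow_pos hbpos k
    have hbk1 : (0:Int) < b ^ (k + 1) := pow_pos hbpos (k + 1)
    have hdivlt : r / b < b ^ (k + 1) := by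
      rw [Int.ediv_lt_iff_lt_mul hbpos]
      calc r < b ^ (k + 1 + 1) := h1
        _ = b ^ (k + 1) * b := by ring
    have hdiv0 : 0 ≤ r / b := Int.ediv_nonneg h0 (by omega)
    rw [dsum_pos b r h hb, ih (r / b) hdiv0 hdivlt]
    -- arithmetic identities
    have e1 : r / b / b ^ k = r / b ^ (k + 1) := by
      rw [Int.ediv_ediv_of_nonneg (show (0:Int) ≤ b by omega), show b * b ^ k = b ^ (k + 1) by ring]
    have hm0 : 0 ≤ r % b ^ (k + 1) := Int.emod_nonneg r (by omega)
    have e2 : r % b ^ (k + 1) % b = r % b := Int.emod_emod_of_dvd r (dvd_pow_self b (Nat.succ_ne_zero k))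
    have e3 : r % b ^ (k + 1) / b = r / b % b ^ k := by
      have hq : r % b ^ (k + 1) = r - b ^ (k + 1) * (r / b ^ (k + 1)) := Int.emod_def r _
      have hq2 : r / b % b ^ k = r / b - b ^ k * (r / b / b ^ k) := Int.emod_def _ _
      rw [hq, hq2, e1]
      have : r - b ^ (k + 1) * (r / b ^ (k + 1)) =
          r + (-(b ^ k * (r / b ^ (k + 1)))) * b := by ring
      rw [this, Int.add_mul_ediv_right _ _ (show b ≠ 0 by omega)]
      ring
    rcases eq_or_lt_of_le hm0 with hm | hm
    · -- r % b^(k+1) = 0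
      have hb1 : (b ^ (k + 1)) ∣ r := Int.dvd_of_emod_eq_zero hm.symm
      have hrb : r % b = 0 := by rw [← e2, ← hm]; simp
      have hrbk : r / b % b ^ k = 0 := by rw [← e3, ← hm]; simp
      rw [← hm, dsum_nonpos b 0 le_rfl, hrb, hrbk, dsum_nonpos b 0 le_rfl, e1]
      ring
    · rw [dsum_pos b (r % b ^ (k + 1)) hm hb, e2, e3, e1]
      ring

-- A's loop on denomination b^k equals acc + top-coin count + digit sum of the rest
theorem loopA_eq (b : Int) (hb : 2 ≤ b) :
    ∀ (k : Nat) (fuel : Nat) (s acc : Int), 0 ≤ s → k + 2 ≤ fuel →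
      minCoins12Loop fuel b (b ^ k) s acc = acc + s / b ^ k + dsum b (s % b ^ k) := by
  intro k
  induction k with
  | zero =>
    intro fuel s acc h0 hf
    obtain ⟨f, rfl⟩ : ∃ f, fuel = f + 2 := ⟨fuel - 2, by omega⟩
    rcases eq_or_lt_of_le h0 with h | h
    · simp [minCoins12Loop, ← h, dsum_nonpos]
    · simp only [pow_zero]
      rw [minCoins12Loop]
      simp only [h, if_pos, show (1:Int) ≤ s by omega, if_true]
      rw [PySem.Int.mod_eq_emod_of_pos (by omega), PySem.Int.floordiv_eq_ediv_of_pos (by omega),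
        Int.emod_one, Int.ediv_one]
      rw [minCoins12Loop]
      simp [dsum_nonpos b 0 le_rfl]
  | succ k ih =>
    intro fuel s acc h0 hf
    obtain ⟨f, rfl⟩ : ∃ f, fuel = f + 1 := ⟨fuel - 1, by omega⟩
    have hbpos : (0:Int) < b := by omega
    have hbk1 : (0:Int) < b ^ (k + 1) := pow_pos hbpos (k + 1)
    rcases eq_or_lt_of_le h0 with h | h
    · simp [minCoins12Loop, ← h, dsum_nonpos]
    rw [minCoins12Loop]
    simp only [h, if_true]
    have hden : PySem.Int.floordiv (b ^ (k + 1)) b = b ^ k := by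
      rw [PySem.Int.floordiv_eq_ediv_of_pos hbpos, pow_succ,
        Int.mul_ediv_cancel _ (by omega)]
    by_cases hle : b ^ (k + 1) ≤ s
    · simp only [hle, if_true, hden]
      rw [PySem.Int.mod_eq_emod_of_pos hbk1, PySem.Int.floordiv_eq_ediv_of_pos hbk1]
      have hm0 : 0 ≤ s % b ^ (k + 1) := Int.emod_nonneg s (by omega)
      have hmlt : s % b ^ (k + 1) < b ^ (k + 1) := Int.emod_lt_of_pos s hbk1
      rw [ih f _ _ hm0 (by omega), dsum_split b hb k (s % b ^ (k + 1)) hm0 hmlt]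
      ring
    · simp only [hle, if_false, hden]
      rw [ih f s acc h0 (by omega)]
      push_neg at hle
      rw [Int.ediv_eq_zero_of_lt h0 hle, Int.emod_eq_of_lt h0 hle,
        dsum_split b hb k s h0 hle]
      ring

-- B's digit loop computes dsum once the fuel exceeds the digit count
theorem loopB_eq (b : Int) (hb : 2 ≤ b) :
    ∀ (fuel : Nat) (r acc : Int), 0 ≤ r → r < b ^ fuel →
      altDigitLoop fuel b r acc = acc + dsum b r := by
  intro fuel
  induction fuel with
  | zero =>
    intro r acc h0 h1
    simp only [pow_zero] at h1
    have : r = 0 := by omega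
    simp [altDigitLoop, this, dsum_nonpos]
  | succ f ih =>
    intro r acc h0 h1
    rcases eq_or_lt_of_le h0 with h | h
    · simp [altDigitLoop, ← h, dsum_nonpos]
    have hbpos : (0:Int) < b := by omega
    rw [altDigitLoop]
    simp only [h, if_true]
    rw [PySem.Int.floordiv_eq_ediv_of_pos hbpos, PySem.Int.mod_eq_emod_of_pos hbpos]
    have hdiv0 : 0 ≤ r / b := Int.ediv_nonneg h0 (by omega)
    have hdivlt : r / b < b ^ f := by
      rw [Int.ediv_lt_iff_lt_mul hbpos]
      calc r < b ^ (f + 1) := h1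
        _ = b ^ f * b := by ring
    rw [ih _ _ hdiv0 hdivlt, dsum_pos b r h hb]
    ring

-- ===== VERDICT (by name: the statement is the Claim_ definition above) =====
theorem minCoins12_spec : Claim_equal_minCoins12 := by
  intro n b s _ hpre
  unfold Spec_minCoins12 minCoins12 minCoins12_alt
  by_cases hs : s ≤ 0
  · -- loop body never runs, both return 0
    simp [minCoins12Loop, show ¬(0 < s) by omega, hs]
  · push_neg at hs
    have hn : 1 ≤ n := by
      rcases hpre with ⟨h, _⟩ | ⟨_, h, _⟩ <;> omega
    have hb1 : 1 ≤ b := by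
      rcases hpre with ⟨h, _⟩ | ⟨_, _, h⟩ <;> omega
    simp only [show ¬ s ≤ 0 by omega, if_false]
    have hnt : n.toNat + 1 = (n - 1).toNat + 2 := by omega
    by_cases hb2 : 2 ≤ b
    · -- main case
      set k := (n - 1).toNat with hk
      have hbpos : (0:Int) < b := by omega
      have hbk : (0:Int) < b ^ k := pow_pos hbpos k
      rw [hnt, loopA_eq b hb2 k (k + 2) s 0 (by omega) le_rfl]
      rw [PySem.Int.floordiv_eq_ediv_of_pos hbk, PySem.Int.mod_eq_emod_of_pos hbk]
      have hm0 : 0 ≤ s % b ^ k := Int.emod_nonneg s (by omega)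
      have hmlt : s % b ^ k < b ^ (k + 2) := by
        calc s % b ^ k < b ^ k := Int.emod_lt_of_pos s hbk
          _ ≤ b ^ (k + 2) := pow_le_pow_right₀ (by omega) (by omega)
      rw [loopB_eq b hb2 (k + 2) _ 0 hm0 hmlt]
      ring
    · -- b = 1: denom is always 1, the first iteration zeroes s
      have hb : b = 1 := by omega
      subst hb
      rw [hnt]
      simp only [one_pow]
      rw [minCoins12Loop]
      simp only [show (0:Int) < s by omega, if_true, le_refl,
        show (1:Int) ≤ s by omega, if_pos]
      rw [PySem.Int.mod_eq_emod_of_pos (by omega), PySem.Int.floordiv_eq_ediv_of_pos (by omega),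
        Int.emod_one, Int.ediv_one]
      rw [minCoins12Loop]
      simp [altDigitLoop, PySem.Int.floordiv_eq_ediv_of_pos, Int.ediv_one]
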